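-- pv_equiv track=rewrite | github.com/epfl-ada/ada-2024-project-metal2024 | src/utilsWordcloud.py | classify_summary
-- ===== SOURCE A (Python) =====
-- def classify_summary(summary, keyword_dict, synonyms=None, threshold=5):
--     summary_lower = summary.lower()
--     # Replace synonyms if provided
--     if synonyms:
--         for syn, replacement in synonyms.items():
--             summary_lower = summary_lower.replace(syn, replacement)
--
--     score = 0
--     for kw, weight in keyword_dict.items():
--         count = summary_lower.count(kw)
--         if count > 0:
--             score += weight * count
--     return "Yes" if score >= threshold else "No"
-- ===== SOURCE B (Python) =====
-- def classify_summary(summary, keyword_dict, synonyms=None, threshold=5):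
--     text = summary.lower()
--     if synonyms:
--         for syn, replacement in synonyms.items():
--             text = text.replace(syn, replacement)
--     # sweep the text once: at each position try one substring per distinct keyword
--     # length, collecting every keyword's match positions
--     lengths = sorted({len(kw) for kw in keyword_dict if kw})
--     starts = {kw: [] for kw in keyword_dict}
--     n = len(text)
--     for i in range(n):
--         for l in lengths:
--             if i + l <= n:
--                 seg = text[i:i + l]
--                 if seg in keyword_dict:
--                     starts[seg].append(i)
--     # weight each keyword by its number of non-overlapping occurrences:
--     # scan its ascending match positions greedily left to right
--     score = 0
--     for kw, weight in keyword_dict.items():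
--         end = 0
--         for i in starts[kw]:
--             if i >= end:
--                 score += weight
--                 end = i + len(kw)
--     return "Yes" if score >= threshold else "No"
-- ===== Notes on version B (the rewrite author's own statement) =====
-- stated objective: alternative
-- what changed: B replaces A's per-keyword str.count passes with one left-to-right sweep of the text that tries one substring per distinct keyword length at each position (a dict-lookup multi-pattern matcher), collecting each keyword's match positions and reading off its non-overlapping count by a greedy filter; Pre_ excludes keyword dicts containing the empty-string keyword, whose len+1 count is a degenerate str.count convention with no analogue in a position-based matcher.
-- outside the precondition, e.g. on classify_summary('ab', {'': 3}, None, 5): A returns 'Yes', B returns 'No'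
import Mathlib
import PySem

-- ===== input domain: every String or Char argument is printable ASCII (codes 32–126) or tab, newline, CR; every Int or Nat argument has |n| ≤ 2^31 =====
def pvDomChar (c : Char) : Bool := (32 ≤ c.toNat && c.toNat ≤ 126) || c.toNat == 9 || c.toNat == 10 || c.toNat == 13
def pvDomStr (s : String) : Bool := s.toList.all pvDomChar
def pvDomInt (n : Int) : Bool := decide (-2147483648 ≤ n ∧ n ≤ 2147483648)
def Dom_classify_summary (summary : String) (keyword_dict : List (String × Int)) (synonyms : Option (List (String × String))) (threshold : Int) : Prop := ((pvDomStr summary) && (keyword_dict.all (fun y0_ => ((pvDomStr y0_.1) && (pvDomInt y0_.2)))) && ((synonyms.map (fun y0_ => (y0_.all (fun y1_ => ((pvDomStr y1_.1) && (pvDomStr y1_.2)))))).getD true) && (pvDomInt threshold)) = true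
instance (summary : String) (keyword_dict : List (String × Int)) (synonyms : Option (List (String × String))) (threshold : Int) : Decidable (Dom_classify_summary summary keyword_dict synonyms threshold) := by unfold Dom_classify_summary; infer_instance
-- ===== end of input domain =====

-- B scores the text with ONE left-to-right sweep that tries one substring per distinct keyword
-- length at each position (dict lookup), collects each keyword's match positions, and reads off
-- its non-overlapping count by a greedy filter (alternative decomposition; return value only).

-- ===== PORT A =====
-- `if synonyms:` guards only the loop: for None or an empty dict the loop body never runs,
-- which is exactly folding over the (possibly empty) items list.
def classify_summary (summary : String) (keyword_dict : List (String × Int)) (synonyms : Option (List (String × String))) (threshold : Int) : String :=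
  let summary_lower := PySem.Str.lower summary
  let summary_lower :=
    match synonyms with
    | none => summary_lower
    | some syns => ((PySem.Dict.ofList syns).items).foldl (fun t p => PySem.Str.replace t p.1 p.2) summary_lower
  let score : Int :=
    ((PySem.Dict.ofList keyword_dict).items).foldl (fun score p =>
      let count := PySem.Str.count summary_lower p.1
      if count > 0 then score + p.2 * (count : Int) else score) 0
  if score ≥ threshold then "Yes" else "No"

-- ===== PORT B =====
def classify_summary_alt (summary : String) (keyword_dict : List (String × Int)) (synonyms : Option (List (String × String))) (threshold : Int) : String :=
  let text := PySem.Str.lower summary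
  let text :=
    match synonyms with
    | none => text
    | some syns => ((PySem.Dict.ofList syns).items).foldl (fun t (p : String × String) => PySem.Str.replace t p.1 p.2) text
  let kd := PySem.Dict.ofList keyword_dict
  -- sorted({len(kw) for kw in keyword_dict if kw}): the distinct keyword lengths, ascending
  let lengths : List Int :=
    PySem.List.sorted
      (PySem.Set.ofList ((kd.keys.filter (fun kw => kw != "")).map (fun kw => (PySem.Str.len kw : Int))))
      (fun x => x) false
  let starts0 : PySem.Dict String (List Int) :=
    kd.keys.foldl (fun d kw => d.insert kw []) PySem.Dict.empty
  let n : Int := (PySem.Str.len text : Int)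
  -- `starts[seg].append(i)` is exact as modify with default []: seg is always a key of starts
  let starts : PySem.Dict String (List Int) :=
    (PySem.List.pyRange 0 n 1).foldl (fun d i =>
      lengths.foldl (fun d l =>
        if i + l ≤ n then
          (if kd.contains (PySem.Str.slice text (some i) (some (i + l)))
           then d.modify (PySem.Str.slice text (some i) (some (i + l))) [] (· ++ [i]) else d)
        else d) d) starts0
  let score : Int :=
    kd.items.foldl (fun score q =>
      ((starts.getD q.1 []).foldl (fun (se : Int × Int) i =>
        if i ≥ se.2 then (se.1 + q.2, i + (PySem.Str.len q.1 : Int)) else se) (score, 0)).1) 0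
  if score ≥ threshold then "Yes" else "No"

-- ===== PRECONDITION & SPEC =====
-- Pre_ excludes keyword dicts containing the empty-string keyword, on which A's score adds
-- weight*(len(text)+1) by str.count('')'s degenerate convention — a corner a position-based
-- matcher has no analogue of (B counts no occurrence there).
def Pre_classify_summary (summary : String) (keyword_dict : List (String × Int)) (synonyms : Option (List (String × String))) (threshold : Int) : Prop :=
  ∀ p ∈ keyword_dict, p.1 ≠ ""
instance (summary : String) (keyword_dict : List (String × Int)) (synonyms : Option (List (String × String))) (threshold : Int) : Decidable (Pre_classify_summary summary keyword_dict synonyms threshold) := by unfold Pre_classify_summary; infer_instance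

def pvWitness_classify_summary : String × (List (String × Int)) × (Option (List (String × String))) × Int :=
  ("the cat sat", [("cat", 3), ("sat", 2)], some [("feline", "cat")], 5)

def Spec_classify_summary (summary : String) (keyword_dict : List (String × Int)) (synonyms : Option (List (String × String))) (threshold : Int) (out : String) : Prop := out = classify_summary_alt summary keyword_dict synonyms threshold
instance (summary : String) (keyword_dict : List (String × Int)) (synonyms : Option (List (String × String))) (threshold : Int) (out : String) : Decidable (Spec_classify_summary summary keyword_dict synonyms threshold out) := by unfold Spec_classify_summary; infer_instance

-- ===== CLAIM (what is proved, stated in full; the proofs are below) =====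
def Claim_equal_classify_summary : Prop := ∀ (summary : String) (keyword_dict : List (String × Int)) (synonyms : Option (List (String × String))) (threshold : Int), Dom_classify_summary summary keyword_dict synonyms threshold → Pre_classify_summary summary keyword_dict synonyms threshold → Spec_classify_summary summary keyword_dict synonyms threshold (classify_summary summary keyword_dict synonyms threshold)

-- ===== LEMMAS AND PROOFS =====

-- non-overlapping occurrence count of kw, structurally (what str.count computes for kw ≠ '')
def pvCnt (kw : List Char) : List Char → Nat
  | [] => 0
  | c :: t => if kw.isPrefixOf (c :: t) then 1 + pvCnt kw (t.drop (kw.length - 1)) else pvCnt kw t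
  termination_by l => l.length
  decreasing_by
  all_goals simp [List.length_drop]

-- B's occurrence positions of kw in the text suffix l that begins at absolute index b
def pvOccL (kw : List Char) : List Char → Nat → List Int
  | [], _ => []
  | c :: t, b => (if kw.isPrefixOf (c :: t) then [(b : Int)] else []) ++ pvOccL kw t (b + 1)

-- B's greedy non-overlap filter: how many positions survive, threshold e, pattern length L
def pvGcnt (L : Int) : List Int → Int → Nat
  | [], _ => 0
  | i :: t, e => if i ≥ e then 1 + pvGcnt L t (i + L) else pvGcnt L t e

lemma pvCountGo_eq_cnt (kw : List Char) (hkw : kw ≠ []) :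
    ∀ (fuel : Nat) (l : List Char) (acc : Nat), l.length ≤ fuel →
      PySem.Chars.count.go kw fuel l acc = acc + pvCnt kw l := by
  intro fuel
  induction fuel with
  | zero => intro l acc h
            have : l = [] := List.length_eq_zero_iff.mp (Nat.le_zero.mp h)
            subst this; simp [PySem.Chars.count.go, pvCnt]
  | succ f ih =>
    intro l acc h
    cases l with
    | nil => simp [PySem.Chars.count.go, pvCnt]
    | cons c t =>
      rw [pvCnt]
      simp only [PySem.Chars.count.go]
      cases hp : kw.isPrefixOf (c :: t) with
      | false => simp only [Bool.false_eq_true, if_false]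
                 exact ih t acc (by simpa using Nat.le_of_succ_le_succ h)
      | true =>
        simp only [if_true]
        have hlen : 1 ≤ kw.length := by
          cases kw with | nil => exact absurd rfl hkw | cons a b => simp
        have hdrop : List.drop kw.length (c :: t) = t.drop (kw.length - 1) := by
          obtain ⟨m, hm⟩ : ∃ m, kw.length = m + 1 := ⟨kw.length - 1, by omega⟩
          rw [hm]; simp
        rw [hdrop, ih _ (acc + 1) (by
          simp only [List.length_cons] at h
          simp only [List.length_drop]; omega)]
        omega

lemma pvStarts0_getD (keys : List String) (d : PySem.Dict String (List Int)) (kw : String)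
    (h : d.getD kw [] = []) :
    (keys.foldl (fun d k => d.insert k []) d).getD kw [] = [] := by
  induction keys generalizing d with
  | nil => simpa using h
  | cons k t ih =>
    simp only [List.foldl_cons]
    exact ih _ (by rw [PySem.Dict.getD_insert]; split <;> simp [h])


lemma pvFold_gcnt (L w : Int) (l : List Int) (s e : Int) :
    (l.foldl (fun (se : Int × Int) i => if i ≥ se.2 then (se.1 + w, i + L) else se) (s, e)).1
      = s + w * pvGcnt L l e := by
  induction l generalizing s e with
  | nil => simp [pvGcnt]
  | cons i t ih =>
    simp only [List.foldl_cons, pvGcnt]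
    split
    · rw [ih]; push_cast; ring
    · rw [ih]




lemma pvGcnt_occ (kw : List Char) (hkw : kw ≠ []) :
    ∀ (n : Nat) (l : List Char), l.length ≤ n → ∀ (b e : Nat),
      pvGcnt (kw.length : Int) (pvOccL kw l b) (e : Int) = pvCnt kw (l.drop (e - b)) := by
  intro n
  induction n with
  | zero =>
    intro l hl b e
    have : l = [] := List.length_eq_zero_iff.mp (Nat.le_zero.mp hl)
    subst this; simp [pvOccL, pvGcnt, pvCnt]
  | succ n ih =>
    intro l hl b e
    cases l with
    | nil => simp [pvOccL, pvGcnt, pvCnt]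
    | cons c t =>
      have hlen : 1 ≤ kw.length := by
        cases kw with | nil => exact absurd rfl hkw | cons a r => simp
      simp only [List.length_cons] at hl
      rw [pvOccL]
      by_cases he : e ≤ b
      · have hd : (c :: t).drop (e - b) = c :: t := by
          have : e - b = 0 := by omega
          rw [this]; rfl
        rw [hd, pvCnt]
        cases hp : kw.isPrefixOf (c :: t) with
        | true =>
          simp only [if_true, List.cons_append, List.nil_append, pvGcnt]
          rw [if_pos (by exact_mod_cast he)]
          have : ((b : Int) + (kw.length : Int)) = ((b + kw.length : Nat) : Int) := by push_cast; ring
          rw [this, ih t (by omega) (b + 1) (b + kw.length)]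
          have : b + kw.length - (b + 1) = kw.length - 1 := by omega
          rw [this]
        | false =>
          simp only [Bool.false_eq_true, if_false, List.nil_append]
          rw [ih t (by omega) (b + 1) e]
          have : e - (b + 1) = 0 := by omega
          rw [this, List.drop_zero]
      · have hbe : b < e := by omega
        have hd : (c :: t).drop (e - b) = t.drop (e - b - 1) := by
          obtain ⟨m, hm⟩ : ∃ m, e - b = m + 1 := ⟨e - b - 1, by omega⟩
          rw [hm]; simp
        rw [hd]
        cases hp : kw.isPrefixOf (c :: t) with
        | true =>
          simp only [if_true, List.cons_append, List.nil_append, pvGcnt]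
          rw [if_neg (by exact_mod_cast not_le.mpr hbe)]
          rw [ih t (by omega) (b + 1) e]
          have : e - (b + 1) = e - b - 1 := by omega
          rw [this]
        | false =>
          simp only [Bool.false_eq_true, if_false, List.nil_append]
          rw [ih t (by omega) (b + 1) e]
          have : e - (b + 1) = e - b - 1 := by omega
          rw [this]



-- length of the tried segment text[b : b+l] (guard b + l ≤ n in force)
lemma pvSegLen (T : String) (b : Nat) (l : Int) (hl : 0 < l)
    (hg : (b : Int) + l ≤ (PySem.Str.len T : Int)) :
    (PySem.Str.slice T (some (b : Int)) (some ((b : Int) + l))).toList.length = l.toNat := by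
  rw [PySem.Str.toList_slice, PySem.Chars.slice_eq_listSlice]
  have hl' : ((b : Int) + l) = ((b + l.toNat : Nat) : Int) := by push_cast; omega
  rw [hl', show ((b : Nat) : Int) = ((b : Nat) : Int) from rfl]
  rw [show ((b + l.toNat : Nat) : Int) = ((b : Nat) : Int) + ((l.toNat : Nat) : Int) by push_cast; ring]
  rw [PySem.List.slice_natCast_add]
  simp only [List.length_take, List.length_drop]
  have hn : (PySem.Str.len T : Int) = (T.toList.length : Int) := by simp [PySem.Str.len_eq]
  rw [hn] at hg
  omega

-- the tried segment equals kw exactly when kw occurs at b (and then the guard holds)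
lemma pvSegEq (T : String) (kw : String) (b : Nat) (hb : b ≤ T.toList.length) :
    (kw.toList.isPrefixOf (T.toList.drop b) = true
      ↔ ((b : Int) + (kw.toList.length : Int) ≤ (PySem.Str.len T : Int)
          ∧ PySem.Str.slice T (some (b : Int)) (some ((b : Int) + (kw.toList.length : Int))) = kw)) := by
  have hsl : (PySem.Str.slice T (some (b : Int)) (some ((b : Int) + (kw.toList.length : Int)))).toList
      = (T.toList.drop b).take kw.toList.length := by
    rw [PySem.Str.toList_slice, PySem.Chars.slice_eq_listSlice]
    rw [show ((b : Int) + (kw.toList.length : Int)) = (((b : Nat) : Int) + ((kw.toList.length : Nat) : Int)) from rfl]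
    rw [PySem.List.slice_natCast_add]
  constructor
  · intro hp
    have hpre := List.isPrefixOf_iff_prefix.mp hp
    have hlen : kw.toList.length ≤ (T.toList.drop b).length := hpre.length_le
    simp only [List.length_drop] at hlen
    constructor
    · have : (PySem.Str.len T : Int) = (T.toList.length : Int) := by simp [PySem.Str.len_eq]
      rw [this]; omega
    · apply String.toList_inj.mp
      rw [hsl]
      exact (List.prefix_iff_eq_take.mp hpre).symm
  · rintro ⟨hg, hs⟩
    apply List.isPrefixOf_iff_prefix.mpr
    apply List.prefix_iff_eq_take.mpr
    rw [← hsl, hs]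

-- one length's try leaves the entry of kw untouched when the length differs
lemma pvStepNoTouch (T : String) (kd : PySem.Dict String Int) (kw : String)
    (d : PySem.Dict String (List Int)) (i : Int) (hi : 0 ≤ i) (l : Int) (hl : 0 < l)
    (hne : l ≠ (kw.toList.length : Int)) :
    ((if i + l ≤ (PySem.Str.len T : Int) then
        (if kd.contains (PySem.Str.slice T (some i) (some (i + l)))
         then d.modify (PySem.Str.slice T (some i) (some (i + l))) [] (· ++ [i]) else d)
      else d) : PySem.Dict String (List Int)).getD kw []
    = d.getD kw [] := by
  split
  case isTrue hg =>
    split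
    case isTrue hc =>
      apply PySem.Dict.getD_modify_of_ne
      intro hEq
      apply hne
      have : (PySem.Str.slice T (some i) (some (i + l))).toList.length = l.toNat := by
        obtain ⟨b, rfl⟩ : ∃ b : Nat, i = (b : Int) := ⟨i.toNat, by omega⟩
        exact pvSegLen T b l hl hg
      rw [← hEq] at this
      omega
    case isFalse => rfl
  case isFalse => rfl

-- a run of lengths none of which is kw's length leaves kw's entry untouched
lemma pvNoTouch2 (T : String) (kd : PySem.Dict String Int) (kw : String) (i : Int) (hi : 0 ≤ i)
    (ls : List Int) (hpos : ∀ l ∈ ls, 0 < l) (hmem : (kw.toList.length : Int) ∉ ls)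
    (d : PySem.Dict String (List Int)) :
    (ls.foldl (fun d l =>
      if i + l ≤ (PySem.Str.len T : Int) then
        (if kd.contains (PySem.Str.slice T (some i) (some (i + l)))
         then d.modify (PySem.Str.slice T (some i) (some (i + l))) [] (· ++ [i]) else d)
      else d) d).getD kw []
    = d.getD kw [] := by
  induction ls generalizing d with
  | nil => rfl
  | cons l t ih =>
    simp only [List.mem_cons, not_or] at hmem
    simp only [List.foldl_cons]
    rw [ih (fun x hx => hpos x (List.mem_cons_of_mem _ hx)) hmem.2]
    exact pvStepNoTouch T kd kw d i hi l (hpos l List.mem_cons_self) (Ne.symm hmem.1)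

-- the inner loop over the distinct lengths appends b to kw's entry iff kw occurs at b
lemma pvInner2 (T : String) (kd : PySem.Dict String Int) (kw : String)
    (hkc : kd.contains kw = true)
    (lengths : List Int) (hnd : lengths.Nodup) (hpos : ∀ l ∈ lengths, 0 < l)
    (b : Nat) (hb : b ≤ T.toList.length) (d : PySem.Dict String (List Int)) :
    (lengths.foldl (fun d l =>
      if (b : Int) + l ≤ (PySem.Str.len T : Int) then
        (if kd.contains (PySem.Str.slice T (some (b : Int)) (some ((b : Int) + l)))
         then d.modify (PySem.Str.slice T (some (b : Int)) (some ((b : Int) + l))) [] (· ++ [(b : Int)]) else d)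
      else d) d).getD kw []
    = d.getD kw []
      ++ (if (kw.toList.length : Int) ∈ lengths ∧ kw.toList.isPrefixOf (T.toList.drop b) = true
          then [(b : Int)] else []) := by
  induction lengths generalizing d with
  | nil => simp
  | cons l t ih =>
    simp only [List.nodup_cons] at hnd
    simp only [List.foldl_cons]
    by_cases hl : l = (kw.toList.length : Int)
    · subst hl
      rw [pvNoTouch2 T kd kw (b : Int) (by positivity) t
        (fun x hx => hpos x (List.mem_cons_of_mem _ hx)) hnd.1]
      by_cases hp : kw.toList.isPrefixOf (T.toList.drop b) = true
      · obtain ⟨hg, hs⟩ := (pvSegEq T kw b hb).mp hp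
        rw [if_pos hg, hs, if_pos hkc, PySem.Dict.getD_modify_self]
        simp [hp]
      · have hnotboth : ¬ ((b : Int) + (kw.toList.length : Int) ≤ (PySem.Str.len T : Int)
            ∧ PySem.Str.slice T (some (b : Int)) (some ((b : Int) + (kw.toList.length : Int))) = kw) :=
          fun h => hp ((pvSegEq T kw b hb).mpr h)
        have hres : (if (b : Int) + (kw.toList.length : Int) ≤ (PySem.Str.len T : Int) then
            (if kd.contains (PySem.Str.slice T (some (b : Int)) (some ((b : Int) + (kw.toList.length : Int))))
             then d.modify (PySem.Str.slice T (some (b : Int)) (some ((b : Int) + (kw.toList.length : Int)))) [] (· ++ [(b : Int)]) else d)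
          else d).getD kw [] = d.getD kw [] := by
          split
          case isTrue hg =>
            split
            case isTrue hc =>
              apply PySem.Dict.getD_modify_of_ne
              intro hEq
              exact hnotboth ⟨hg, hEq.symm⟩
            case isFalse => rfl
          case isFalse => rfl
        rw [hres]
        simp [hp]
    · rw [ih hnd.2 (fun x hx => hpos x (List.mem_cons_of_mem _ hx))]
      rw [pvStepNoTouch T kd kw d (b : Int) (by positivity) l (hpos l List.mem_cons_self) (by exact fun h => hl h)]
      have : ((kw.toList.length : Int) ∈ l :: t) ↔ ((kw.toList.length : Int) ∈ t) := by
        constructor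
        · intro h
          rcases List.mem_cons.mp h with h | h
          · exact absurd h.symm hl
          · exact h
        · exact List.mem_cons_of_mem _
      simp only [this]

-- the whole sweep: kw's entry collects exactly its occurrence positions, in order
lemma pvSweep (T : String) (kd : PySem.Dict String Int) (kw : String)
    (hkc : kd.contains kw = true)
    (lengths : List Int) (hnd : lengths.Nodup) (hpos : ∀ l ∈ lengths, 0 < l)
    (hlm : (kw.toList.length : Int) ∈ lengths) :
    ∀ (l : List Char) (b : Nat), T.toList.drop b = l → ∀ (d : PySem.Dict String (List Int)),
      ((PySem.List.pyRange (b : Int) (PySem.Str.len T : Int) 1).foldl (fun d i =>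
        lengths.foldl (fun d l =>
          if i + l ≤ (PySem.Str.len T : Int) then
            (if kd.contains (PySem.Str.slice T (some i) (some (i + l)))
             then d.modify (PySem.Str.slice T (some i) (some (i + l))) [] (· ++ [i]) else d)
          else d) d) d).getD kw []
      = d.getD kw [] ++ pvOccL kw.toList l b := by
  intro l
  induction l with
  | nil =>
    intro b h d
    have hbl : T.toList.length ≤ b := by
      have := congrArg List.length h
      simp only [List.length_drop, List.length_nil] at this
      omega
    rw [PySem.List.pyRange_one_eq_nil (by
      rw [show (PySem.Str.len T : Int) = (T.toList.length : Int) from rfl]; omega)]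
    simp [pvOccL]
  | cons c t ih =>
    intro b h d
    have hbl : b < T.toList.length := by
      by_contra hc
      rw [List.drop_eq_nil_of_le (by omega)] at h
      exact absurd h (by simp)
    rw [PySem.List.pyRange_one_cons (by
      rw [show (PySem.Str.len T : Int) = (T.toList.length : Int) from rfl]
      exact_mod_cast hbl), List.foldl_cons]
    have hdrop : T.toList.drop (b + 1) = t := by
      have := (List.tail_drop (l := T.toList) (i := b)).symm
      rw [h] at this; simpa using this
    have hrec : ((b : Int) + 1) = (((b + 1 : Nat)) : Int) := by push_cast; ring
    rw [hrec, ih (b + 1) hdrop]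
    rw [pvInner2 T kd kw hkc lengths hnd hpos b (by omega) d]
    rw [pvOccL, h]
    have hlm' : ((kw.length : Int)) ∈ lengths := by simpa using hlm
    by_cases hp : kw.toList.isPrefixOf (c :: t) = true
    · rw [← h] at hp
      have hp2 : (kw.toList <+: c :: t) := by
        rw [h] at hp; exact List.isPrefixOf_iff_prefix.mp hp
      simp [hlm', hp2, List.append_assoc]
    · rw [← h] at hp
      have hp' : ¬ (kw.toList <+: c :: t) := by
        rw [h] at hp; simpa [List.isPrefixOf_iff_prefix] using hp
      simp [hp']

-- every key of the keyword dict comes from some pair of the input list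
lemma pvKeys_mem (kdl : List (String × Int)) (k : String)
    (h : k ∈ (PySem.Dict.ofList kdl).keys) : ∃ v, (k, v) ∈ kdl := by
  have hkeys : (PySem.Dict.ofList kdl).keys = PySem.Set.ofList (kdl.map (·.1)) := by
    show (kdl.foldl (fun d p => d.insert p.1 p.2) PySem.Dict.empty).keys = _
    rw [show (fun (d : PySem.Dict String Int) (p : String × Int) => d.insert p.1 p.2) = (fun d p => d.insert ((·.1) p) ((fun (_ : PySem.Dict String Int) (q : String × Int) => q.2) d p)) from rfl]
    rw [PySem.Dict.keys_foldl_insert_key]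
    simp [PySem.Set.update_nil_left, PySem.Dict.keys_empty]
  rw [hkeys, PySem.Set.mem_ofList, List.mem_map] at h
  obtain ⟨p, hp, hpk⟩ := h
  exact ⟨p.2, by rw [← hpk]; exact hp⟩

-- the two score computations agree for every text (no empty keyword)
lemma pvScore_eq (T : String) (kdl : List (String × Int)) (hpre : ∀ p ∈ kdl, p.1 ≠ "") :
    ((PySem.Dict.ofList kdl).items).foldl (fun score p =>
        let count := PySem.Str.count T p.1
        if count > 0 then score + p.2 * (count : Int) else score) 0
    = (let kd := PySem.Dict.ofList kdl
       let lengths : List Int :=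
         PySem.List.sorted
           (PySem.Set.ofList ((kd.keys.filter (fun kw => kw != "")).map (fun kw => (PySem.Str.len kw : Int))))
           (fun x => x) false
       let starts0 : PySem.Dict String (List Int) :=
         kd.keys.foldl (fun d kw => d.insert kw []) PySem.Dict.empty
       let n : Int := (PySem.Str.len T : Int)
       let starts : PySem.Dict String (List Int) :=
         (PySem.List.pyRange 0 n 1).foldl (fun d i =>
           lengths.foldl (fun d l =>
             if i + l ≤ n then
               (if kd.contains (PySem.Str.slice T (some i) (some (i + l)))
                then d.modify (PySem.Str.slice T (some i) (some (i + l))) [] (· ++ [i]) else d)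
             else d) d) starts0
       kd.items.foldl (fun score q =>
         ((starts.getD q.1 []).foldl (fun (se : Int × Int) i =>
           if i ≥ se.2 then (se.1 + q.2, i + (PySem.Str.len q.1 : Int)) else se) (score, 0)).1) 0) := by
  dsimp only
  set kd := PySem.Dict.ofList kdl with hkd
  set lengths : List Int :=
    PySem.List.sorted
      (PySem.Set.ofList ((kd.keys.filter (fun kw => kw != "")).map (fun kw => (PySem.Str.len kw : Int))))
      (fun x => x) false with hlengths
  set starts0 : PySem.Dict String (List Int) :=
    kd.keys.foldl (fun d kw => d.insert kw []) PySem.Dict.empty with hstarts0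
  set starts : PySem.Dict String (List Int) :=
    (PySem.List.pyRange 0 (PySem.Str.len T : Int) 1).foldl (fun d i =>
      lengths.foldl (fun d l =>
        if i + l ≤ (PySem.Str.len T : Int) then
          (if kd.contains (PySem.Str.slice T (some i) (some (i + l)))
           then d.modify (PySem.Str.slice T (some i) (some (i + l))) [] (· ++ [i]) else d)
        else d) d) starts0 with hstartsdef
  -- A side: fold → sum of per-item terms
  have hA1 := PySem.List.foldl_congr_mem kd.items
    (fun (score : Int) (p : String × Int) =>
      let count := PySem.Str.count T p.1
      if count > 0 then score + p.2 * (count : Int) else score)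
    (fun (score : Int) (p : String × Int) =>
      score + (if PySem.Str.count T p.1 > 0 then p.2 * (PySem.Str.count T p.1 : Int) else 0))
    0 (by intro acc p _; dsimp only; split <;> simp)
  have hA2 := PySem.List.foldl_add kd.items
    (fun (p : String × Int) =>
      if PySem.Str.count T p.1 > 0 then p.2 * (PySem.Str.count T p.1 : Int) else 0) 0
  -- B side: fold → sum of per-item terms
  have hB1 := PySem.List.foldl_congr_mem kd.items
    (fun (score : Int) (q : String × Int) =>
      ((starts.getD q.1 []).foldl (fun (se : Int × Int) i =>
        if i ≥ se.2 then (se.1 + q.2, i + (PySem.Str.len q.1 : Int)) else se) (score, 0)).1)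
    (fun (score : Int) (q : String × Int) =>
      score + q.2 * pvGcnt (PySem.Str.len q.1 : Int) (starts.getD q.1 []) 0)
    0 (by intro acc q _; exact pvFold_gcnt _ _ _ _ _)
  have hB2 := PySem.List.foldl_add kd.items
    (fun (q : String × Int) =>
      q.2 * pvGcnt (PySem.Str.len q.1 : Int) (starts.getD q.1 []) 0) 0
  rw [hA1, hA2, hB1, hB2]
  refine congrArg (fun l => (0 : Int) + List.sum l) (List.map_congr_left ?_)
  intro q hq
  -- facts about this keyword
  have hk : q.1 ∈ kd.keys := PySem.Dict.mem_keys_of_mem_items kd hq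
  have hne : q.1 ≠ "" := by
    obtain ⟨v, hv⟩ := pvKeys_mem kdl q.1 hk
    exact hpre (q.1, v) hv
  have hneL : q.1.toList ≠ [] := by
    simpa [String.toList_eq_nil_iff] using hne
  -- facts about the length list
  have hnd : lengths.Nodup := by
    rw [hlengths]
    exact (PySem.List.sorted_perm _ _ _).nodup_iff.mpr (PySem.Set.nodup_ofList _)
  have hpos : ∀ l ∈ lengths, 0 < l := by
    intro l hl
    rw [hlengths, PySem.List.mem_sorted, PySem.Set.mem_ofList, List.mem_map] at hl
    obtain ⟨kw', hkw', rfl⟩ := hl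
    have : kw' ≠ "" := by simpa using (List.mem_filter.mp hkw').2
    have : kw'.toList ≠ [] := by simpa [String.toList_eq_nil_iff] using this
    have : 0 < kw'.toList.length := List.length_pos_iff.mpr this
    rw [show (PySem.Str.len kw' : Int) = (kw'.toList.length : Int) from rfl]
    exact_mod_cast this
  have hlm : ((q.1.toList.length : Int)) ∈ lengths := by
    rw [hlengths, PySem.List.mem_sorted, PySem.Set.mem_ofList]
    refine List.mem_map.mpr ⟨q.1, List.mem_filter.mpr ⟨hk, by simpa using hne⟩, rfl⟩
  have hkc : kd.contains q.1 = true := (PySem.Dict.contains_iff_mem_keys kd q.1).mpr hk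
  -- the collected positions of q.1
  have hst0 : starts0.getD q.1 [] = [] :=
    hstarts0 ▸ pvStarts0_getD kd.keys PySem.Dict.empty q.1 (by simp [PySem.Dict.getD_empty])
  have hstarts : starts.getD q.1 [] = pvOccL q.1.toList T.toList 0 := by
    have h0 : ((0 : Nat) : Int) = (0 : Int) := by norm_num
    rw [hstartsdef, ← h0,
      pvSweep T kd q.1 hkc lengths hnd hpos hlm T.toList 0 (by simp) starts0, hst0]
    simp
  -- count and greedy count agree
  have hcnt : PySem.Str.count T q.1 = pvCnt q.1.toList T.toList := by
    show PySem.Chars.count T.toList q.1.toList = _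
    rw [PySem.Chars.count]
    rw [if_neg (by simpa [List.isEmpty_iff] using hneL)]
    rw [pvCountGo_eq_cnt q.1.toList hneL T.toList.length T.toList 0 le_rfl]
    omega
  have hg : pvGcnt (PySem.Str.len q.1 : Int) (starts.getD q.1 []) 0 = pvCnt q.1.toList T.toList := by
    rw [hstarts]
    have hlen : (PySem.Str.len q.1 : Int) = (q.1.toList.length : Int) := rfl
    have h0 : ((0 : Nat) : Int) = (0 : Int) := by norm_num
    rw [hlen, ← h0, pvGcnt_occ q.1.toList hneL T.toList.length T.toList le_rfl 0 0]
    simp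
  rw [hg, hcnt]
  rcases Nat.eq_zero_or_pos (pvCnt q.1.toList T.toList) with hc | hc
  · simp [hc]
  · rw [if_pos hc]

-- ===== VERDICT (by name: the statement is the Claim_ definition above) =====
theorem classify_summary_spec : Claim_equal_classify_summary := by
  intro summary keyword_dict synonyms threshold _ hpre
  unfold Spec_classify_summary classify_summary classify_summary_alt
  dsimp only
  rw [pvScore_eq _ _ hpre]
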